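-- pv_equiv track=rewrite | github.com/polygrad/polygrad | test/test_tinygrad_parity.py | kernel_structure
-- ===== SOURCE A (Python) =====
-- STRUCTURE_KEYS: tuple[str, ...] = (
--     "RANGE",
--     "END",
--     "REDUCE",
--     "STORE",
--     "LOAD",
--     "INDEX",
--     "AFTER",
--     "DEFINE_LOCAL",
--     "DEFINE_REG",
-- )
--
-- def kernel_structure(ops: list[str]) -> dict[str, int]:
--     counts = {k: 0 for k in STRUCTURE_KEYS}
--     range_depth = 0
--     max_range_depth = 0
--     min_range_depth = 0
--     for op in ops:
--         if op in counts:
--             counts[op] += 1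
--         if op == "RANGE":
--             range_depth += 1
--             max_range_depth = max(max_range_depth, range_depth)
--         elif op == "END":
--             range_depth -= 1
--             min_range_depth = min(min_range_depth, range_depth)
--     counts["MAX_RANGE_DEPTH"] = max_range_depth
--     counts["FINAL_RANGE_DEPTH"] = range_depth
--     counts["MIN_RANGE_DEPTH"] = min_range_depth
--     return counts
-- ===== SOURCE B (Python) =====
-- STRUCTURE_KEYS: tuple[str, ...] = (
--     "RANGE",
--     "END",
--     "REDUCE",
--     "STORE",
--     "LOAD",
--     "INDEX",
--     "AFTER",
--     "DEFINE_LOCAL",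
--     "DEFINE_REG",
-- )
--
-- def kernel_structure(ops: list[str]) -> dict[str, int]:
--     # two independent passes: per-key counting, and 0-seeded prefix sums of range deltas
--     prefix = [0]
--     for op in ops:
--         prefix.append(prefix[-1] + (1 if op == "RANGE" else -1 if op == "END" else 0))
--     result = {k: ops.count(k) for k in STRUCTURE_KEYS}
--     result["MAX_RANGE_DEPTH"] = max(prefix)
--     result["FINAL_RANGE_DEPTH"] = prefix[-1]
--     result["MIN_RANGE_DEPTH"] = min(prefix)
--     return result
-- ===== Notes on version B (the rewrite author's own statement) =====
-- stated objective: alternative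
-- what changed: A's single stateful loop (dict membership-guarded increments plus running depth/max/min) is replaced by two independent passes: per-key ops.count over the nine keys, and a 0-seeded prefix-sum list of RANGE/END deltas whose max/min/last give the three depth statistics.
import Mathlib
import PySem

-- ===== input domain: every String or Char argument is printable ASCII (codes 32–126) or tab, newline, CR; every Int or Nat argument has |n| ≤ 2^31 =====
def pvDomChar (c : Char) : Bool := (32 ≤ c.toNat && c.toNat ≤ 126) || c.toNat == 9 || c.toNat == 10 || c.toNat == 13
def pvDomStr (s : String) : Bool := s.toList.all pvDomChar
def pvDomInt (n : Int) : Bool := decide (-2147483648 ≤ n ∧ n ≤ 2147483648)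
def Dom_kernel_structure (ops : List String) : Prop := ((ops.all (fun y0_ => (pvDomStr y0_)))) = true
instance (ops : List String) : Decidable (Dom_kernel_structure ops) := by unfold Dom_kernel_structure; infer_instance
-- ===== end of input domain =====

-- B replaces A's single stateful loop by two independent passes (per-key counting, and
-- 0-seeded prefix sums of RANGE/END deltas whose max/min/last give the depth stats): alternative decomposition, same cost.

-- module constant STRUCTURE_KEYS (shared by both Pythons)
def structureKeys : List String :=
  ["RANGE", "END", "REDUCE", "STORE", "LOAD", "INDEX", "AFTER", "DEFINE_LOCAL", "DEFINE_REG"]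

-- ===== PORT A =====
def kernel_structure (ops : List String) : List (String × Int) :=
  -- counts = {k: 0 for k in STRUCTURE_KEYS}
  let counts0 : PySem.Dict String Int :=
    structureKeys.foldl (fun d k => d.insert k 0) PySem.Dict.empty
  -- single loop over ops, state = (counts, range_depth, max_range_depth, min_range_depth)
  let st :=
    ops.foldl
      (fun (st : PySem.Dict String Int × Int × Int × Int) op =>
        ((if st.1.contains op then st.1.modify op 0 (· + 1) else st.1),
         (if op == "RANGE" then
            (st.2.1 + 1, max st.2.2.1 (st.2.1 + 1), st.2.2.2)
          else if op == "END" then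
            (st.2.1 - 1, st.2.2.1, min st.2.2.2 (st.2.1 - 1))
          else st.2)))
      (counts0, (0, 0, 0))
  -- counts["MAX_RANGE_DEPTH"] = …; counts["FINAL_RANGE_DEPTH"] = …; counts["MIN_RANGE_DEPTH"] = …
  (((st.1.insert "MAX_RANGE_DEPTH" st.2.2.1).insert "FINAL_RANGE_DEPTH" st.2.1).insert
      "MIN_RANGE_DEPTH" st.2.2.2).items

-- ===== PORT B =====
def kernel_structure_alt (ops : List String) : List (String × Int) :=
  -- prefix = [0]; for op in ops: prefix.append(prefix[-1] + delta)
  let pref :=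
    ops.foldl
      (fun (acc : List Int) op =>
        acc ++ [PySem.List.pyGetD acc (-1) 0 +
                  (if op == "RANGE" then (1 : Int) else if op == "END" then -1 else 0)])
      [0]
  -- result = {k: ops.count(k) for k in STRUCTURE_KEYS}; then three fresh keys append
  structureKeys.map (fun k => (k, (PySem.List.count ops k : Int))) ++
    [("MAX_RANGE_DEPTH", ((PySem.List.max? pref (fun y => y)).getD 0)),
     ("FINAL_RANGE_DEPTH", PySem.List.pyGetD pref (-1) 0),
     ("MIN_RANGE_DEPTH", ((PySem.List.min? pref (fun y => y)).getD 0))]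

-- ===== PRECONDITION & SPEC =====
def Spec_kernel_structure (ops : List String) (out : List (String × Int)) : Prop := out = kernel_structure_alt ops
instance (ops : List String) (out : List (String × Int)) : Decidable (Spec_kernel_structure ops out) := by unfold Spec_kernel_structure; infer_instance

-- ===== CLAIM (what is proved, stated in full; the proofs are below) =====
def Claim_equal_kernel_structure : Prop := ∀ (ops : List String), Dom_kernel_structure ops → Spec_kernel_structure ops (kernel_structure ops)

-- ===== LEMMAS AND PROOFS =====

def pvDelta (op : String) : Int := if op = "RANGE" then 1 else if op = "END" then -1 else 0

def pvS : List String → Int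
  | [] => 0
  | op :: t => pvDelta op + pvS t

def pvM : List String → Int
  | [] => 0
  | op :: t => max 0 (pvDelta op + pvM t)

def pvMn : List String → Int
  | [] => 0
  | op :: t => min 0 (pvDelta op + pvMn t)

def pvPsums (r : Int) : List String → List Int
  | [] => []
  | op :: t => (r + pvDelta op) :: pvPsums (r + pvDelta op) t

lemma pvM_nonneg (ops : List String) : 0 ≤ pvM ops := by
  cases ops <;> simp [pvM]

lemma pvMn_nonpos (ops : List String) : pvMn ops ≤ 0 := by
  cases ops <;> simp [pvMn]

-- the numeric triple of A's loop, in closed form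
lemma pvNumLoop_eq (ops : List String) : ∀ (rd mx mn : Int), rd ≤ mx → mn ≤ rd →
    ops.foldl
      (fun (p : Int × Int × Int) op =>
        (if op == "RANGE" then (p.1 + 1, max p.2.1 (p.1 + 1), p.2.2)
         else if op == "END" then (p.1 - 1, p.2.1, min p.2.2 (p.1 - 1))
         else p))
      (rd, mx, mn)
    = (rd + pvS ops, max mx (rd + pvM ops), min mn (rd + pvMn ops)) := by
  induction ops with
  | nil => intro rd mx mn h1 h2; simp [pvS, pvM, pvMn]; omega
  | cons op t ih =>
    intro rd mx mn h1 h2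
    have hM := pvM_nonneg t
    have hMn := pvMn_nonpos t
    by_cases hR : op = "RANGE"
    · simp only [List.foldl_cons, hR, beq_self_eq_true, if_true]
      rw [ih (rd + 1) (max mx (rd + 1)) mn (by omega) (by omega)]
      refine Prod.ext ?_ (Prod.ext ?_ ?_) <;> simp [pvS, pvM, pvMn, pvDelta] <;> omega
    · by_cases hE : op = "END"
      · simp only [List.foldl_cons, hE, beq_self_eq_true, if_true,
          show (("END" : String) == "RANGE") = false by decide, Bool.false_eq_true, if_false]
        rw [ih (rd - 1) mx (min mn (rd - 1)) (by omega) (by omega)]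
        refine Prod.ext ?_ (Prod.ext ?_ ?_) <;> simp [pvS, pvM, pvMn, pvDelta] <;> omega
      · have hR' : (op == "RANGE") = false := by simp [hR]
        have hE' : (op == "END") = false := by simp [hE]
        simp only [List.foldl_cons, hR', hE', Bool.false_eq_true, if_false]
        rw [ih rd mx mn h1 h2]
        refine Prod.ext ?_ (Prod.ext ?_ ?_) <;> simp [pvS, pvM, pvMn, pvDelta, hR, hE] <;> omega

-- B's prefix list in closed form
lemma pvPrefix_eq (ops : List String) : ∀ (acc : List Int) (x : Int),
    ops.foldl
      (fun (acc : List Int) op =>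
        acc ++ [PySem.List.pyGetD acc (-1) 0 +
                  (if op == "RANGE" then (1 : Int) else if op == "END" then -1 else 0)])
      (acc ++ [x])
    = (acc ++ [x]) ++ pvPsums x ops := by
  induction ops with
  | nil => intro acc x; simp [pvPsums]
  | cons op t ih =>
    intro acc x
    simp only [List.foldl_cons, PySem.List.pyGetD_neg_one_append_singleton]
    rw [ih (acc ++ [x])]
    by_cases hR : op = "RANGE"
    · simp [pvPsums, pvDelta, hR]
    · by_cases hE : op = "END" <;> simp [pvPsums, pvDelta, hR, hE]

lemma pvFoldl_max_psums (ops : List String) : ∀ (a r : Int), r ≤ a →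
    (pvPsums r ops).foldl max a = max a (r + pvM ops) := by
  induction ops with
  | nil => intro a r h; simp [pvPsums, pvM]; omega
  | cons op t ih =>
    intro a r h
    have hM := pvM_nonneg t
    simp only [pvPsums, List.foldl_cons]
    rw [ih (max a (r + pvDelta op)) (r + pvDelta op) (by omega)]
    simp only [pvM]
    omega

lemma pvFoldl_min_psums (ops : List String) : ∀ (a r : Int), a ≤ r →
    (pvPsums r ops).foldl min a = min a (r + pvMn ops) := by
  induction ops with
  | nil => intro a r h; simp [pvPsums, pvMn]; omega
  | cons op t ih =>
    intro a r h
    have hMn := pvMn_nonpos t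
    simp only [pvPsums, List.foldl_cons]
    rw [ih (min a (r + pvDelta op)) (r + pvDelta op) (by omega)]
    simp only [pvMn]
    omega

lemma pvGetLast_psums (ops : List String) : ∀ (r : Int) (h : (r :: pvPsums r ops) ≠ []),
    (r :: pvPsums r ops).getLast h = r + pvS ops := by
  induction ops with
  | nil => intro r h; simp [pvPsums, pvS]
  | cons op t ih =>
    intro r h
    simp only [pvPsums, pvS]
    rw [List.getLast_cons (by simp), ih (r + pvDelta op) (by simp)]
    ring

lemma pvLast_psums (ops : List String) (r : Int) :
    PySem.List.pyGetD (r :: pvPsums r ops) (-1) 0 = r + pvS ops := by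
  rw [PySem.List.pyGetD_neg_one _ _ (by simp), pvGetLast_psums]

-- A's dict loop: values, keys
lemma pvDictLoop_getD (ops : List String) : ∀ (d : PySem.Dict String Int) (k : String),
    (ops.foldl (fun d op => if d.contains op then d.modify op 0 (· + 1) else d) d).getD k 0
      = d.getD k 0 + (if d.contains k then (ops.count k : Int) else 0) := by
  induction ops with
  | nil => intro d k; simp
  | cons op t ih =>
    intro d k
    simp only [List.foldl_cons]
    by_cases hc : d.contains op
    · rw [if_pos hc, ih]
      have hck : (d.modify op 0 (· + 1)).contains k = d.contains k := by
        rw [PySem.Dict.contains_modify]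
        by_cases hk : k = op
        · subst hk; simp [hc]
        · simp [show (k == op) = false by simp [hk]]
      rw [hck]
      by_cases hk : k = op
      · subst hk
        rw [PySem.Dict.getD_modify_self, List.count_cons_self]
        simp only [hc, if_true]
        push_cast; ring
      · rw [PySem.Dict.getD_modify_of_ne _ _ _ hk,
          List.count_cons_of_ne (Ne.symm hk)]
    · rw [if_neg hc, ih]
      by_cases hk : k = op
      · subst hk; simp [hc]
      · rw [List.count_cons_of_ne (Ne.symm hk)]

lemma pvDictLoop_keys (ops : List String) : ∀ (d : PySem.Dict String Int),
    (ops.foldl (fun d op => if d.contains op then d.modify op 0 (· + 1) else d) d).keys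
      = d.keys := by
  induction ops with
  | nil => intro d; rfl
  | cons op t ih =>
    intro d
    simp only [List.foldl_cons]
    by_cases hc : d.contains op
    · rw [if_pos hc, ih]
      rw [PySem.Dict.keys_modify, PySem.Dict.keys_insert_of_contains _ _ hc]
    · rw [if_neg hc, ih]

-- A's product fold splits into the dict fold and the numeric fold
lemma pvA_split (ops : List String) : ∀ (d0 : PySem.Dict String Int) (c : Int × Int × Int),
    ops.foldl
      (fun (st : PySem.Dict String Int × Int × Int × Int) op =>
        ((if st.1.contains op then st.1.modify op 0 (· + 1) else st.1),
         (if op == "RANGE" then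
            (st.2.1 + 1, max st.2.2.1 (st.2.1 + 1), st.2.2.2)
          else if op == "END" then
            (st.2.1 - 1, st.2.2.1, min st.2.2.2 (st.2.1 - 1))
          else st.2)))
      (d0, c)
    = (ops.foldl (fun d op => if d.contains op then d.modify op 0 (· + 1) else d) d0,
       ops.foldl
         (fun (p : Int × Int × Int) op =>
           (if op == "RANGE" then (p.1 + 1, max p.2.1 (p.1 + 1), p.2.2)
            else if op == "END" then (p.1 - 1, p.2.1, min p.2.2 (p.1 - 1))
            else p)) c) := by
  induction ops with
  | nil => intro d0 c; rfl
  | cons op t ih => intro d0 c; simp only [List.foldl_cons]; exact ih _ _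

-- B's prefix list is 0 followed by the partial delta sums
lemma pvPref_eq (ops : List String) :
    ops.foldl
      (fun (acc : List Int) op =>
        acc ++ [PySem.List.pyGetD acc (-1) 0 +
                  (if op == "RANGE" then (1 : Int) else if op == "END" then -1 else 0)])
      [0]
    = 0 :: pvPsums 0 ops := by
  have h := pvPrefix_eq ops [] 0
  simpa using h

-- ===== VERDICT (by name: the statement is the Claim_ definition above) =====
theorem kernel_structure_spec : Claim_equal_kernel_structure := by
  intro ops _
  unfold Spec_kernel_structure
  simp only [kernel_structure, kernel_structure_alt]
  rw [pvA_split, pvNumLoop_eq ops 0 0 0 (le_refl 0) (le_refl 0), pvPref_eq ops,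
    PySem.List.max?_id_cons, PySem.List.min?_id_cons, pvLast_psums]
  simp only [Option.getD_some]
  rw [pvFoldl_max_psums ops 0 0 (le_refl 0), pvFoldl_min_psums ops 0 0 (le_refl 0)]
  -- the dict side
  set c0 : PySem.Dict String Int :=
    structureKeys.foldl (fun d k => d.insert k 0) PySem.Dict.empty with hc0
  have hkeys : (ops.foldl (fun d op => if d.contains op then d.modify op 0 (· + 1) else d)
      c0).keys = structureKeys := by
    rw [pvDictLoop_keys]; rw [hc0]; decide
  have hnodup : structureKeys.Nodup := by decide
  have h1 : (ops.foldl (fun d op => if d.contains op then d.modify op 0 (· + 1) else d)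
      c0).contains "MAX_RANGE_DEPTH" = false := by
    rw [PySem.Dict.contains_eq_decide_mem_keys, hkeys]; decide
  rw [PySem.Dict.items_insert_of_not_contains _ _ ?hc3, PySem.Dict.items_insert_of_not_contains _ _ ?hc2,
    PySem.Dict.items_insert_of_not_contains _ _ h1]
  case hc2 =>
    rw [PySem.Dict.contains_eq_decide_mem_keys, PySem.Dict.keys_insert_of_not_contains _ _ h1, hkeys]
    decide
  case hc3 =>
    rw [PySem.Dict.contains_eq_decide_mem_keys, PySem.Dict.keys_insert_of_not_contains,
      PySem.Dict.keys_insert_of_not_contains _ _ h1, hkeys]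
    · decide
    · rw [PySem.Dict.contains_eq_decide_mem_keys, PySem.Dict.keys_insert_of_not_contains _ _ h1, hkeys]
      decide
  rw [PySem.Dict.items_eq_map_keys _ (hkeys ▸ hnodup) 0, hkeys]
  rw [List.map_congr_left (g := fun k => (k, (PySem.List.count ops k : Int))) ?hval]
  case hval =>
    intro k hk
    have hcont : c0.contains k = true ∧ c0.getD k 0 = 0 := by
      rw [hc0]; fin_cases hk <;> exact ⟨by decide, by decide⟩
    rw [pvDictLoop_getD, hcont.1, hcont.2, if_pos rfl]
    simp [PySem.List.count_eq]
  simp only [List.append_assoc, List.cons_append, List.nil_append]
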